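-- pv_equiv track=rewrite | github.com/open-intell/CogForge | LexForge.py | _split_lines_preserve
-- ===== SOURCE A (Python) =====
-- from typing import Dict, List, Optional, Tuple, Iterator
--
-- def _split_lines_preserve(source: str) -> List[str]:
--     """
--     Split source into lines, preserving line-ending characters.
--     Each element includes the trailing newline (if any).
--     """
--     lines = []
--     i = 0
--     while i < len(source):
--         if source[i] == "\r":
--             if i + 1 < len(source) and source[i + 1] == "\n":
--                 j = i + 2
--             else:
--                 j = i + 1
--             lines.append(source[i:j])
--             i = j
--         elif source[i] == "\n":
--             lines.append(source[i:i + 1])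
--             i += 1
--         else:
--             # Find next newline
--             j = i
--             while j < len(source) and source[j] not in ("\r", "\n"):
--                 j += 1
--             if j < len(source):
--                 # Include the newline
--                 if source[j] == "\r" and j + 1 < len(source) and source[j + 1] == "\n":
--                     lines.append(source[i:j + 2])
--                     i = j + 2
--                 else:
--                     lines.append(source[i:j + 1])
--                     i = j + 1
--             else:
--                 lines.append(source[i:j])
--                 i = j
--     return lines
-- ===== SOURCE B (Python) =====
-- from typing import Dict, List, Optional, Tuple, Iterator
--
-- def _split_lines_preserve(source: str) -> List[str]:
--     """Split source into lines, preserving line-ending characters."""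
--     return source.splitlines(keepends=True)
-- ===== Notes on version B (the rewrite author's own statement) =====
-- stated objective: idiomatic
-- what changed: Replaces the hand-written index-scanning state machine with a single call to str.splitlines(keepends=True), which on the printable-ASCII/tab/LF/CR domain performs exactly the same keepends line segmentation.
import Mathlib
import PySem

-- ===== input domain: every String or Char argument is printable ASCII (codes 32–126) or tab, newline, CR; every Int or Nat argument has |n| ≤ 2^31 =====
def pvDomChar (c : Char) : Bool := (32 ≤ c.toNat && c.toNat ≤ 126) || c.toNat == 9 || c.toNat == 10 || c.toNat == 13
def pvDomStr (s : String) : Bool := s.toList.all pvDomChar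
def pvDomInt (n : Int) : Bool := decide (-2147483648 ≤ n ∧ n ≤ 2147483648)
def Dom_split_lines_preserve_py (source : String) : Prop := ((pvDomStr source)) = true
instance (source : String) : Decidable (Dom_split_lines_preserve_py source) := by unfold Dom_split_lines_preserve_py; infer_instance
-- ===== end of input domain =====

-- B replaces A's manual index-scanning loop with str.splitlines(keepends=True) (idiomatic; same O(n) cost).

-- ===== PORT A =====
-- inner 'while j < len(source) and source[j] not in ("\r","\n"): j += 1' loop of A
def innerA (s : List Char) (j : Nat) : Nat :=
  if h : j < s.length then
    if s[j] = '\r' ∨ s[j] = '\n' then j else innerA s (j + 1)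
  else j
termination_by s.length - j

-- needed by loopA's termination proof
lemma innerA_ge (s : List Char) (i : Nat) : i ≤ innerA s i := by
  unfold innerA
  split
  · split
    · exact Nat.le_refl _
    · have := innerA_ge s (i + 1); omega
  · exact Nat.le_refl _
termination_by s.length - i

-- A's outer while loop; index i, 'source[i:j]' rendered as (s.drop i).take (j - i) (exact for 0 ≤ i ≤ j)
def loopA (s : List Char) (i : Nat) : List String :=
  if h : i < s.length then
    if s[i] = '\r' then
      if h2 : i + 1 < s.length then
        if s[i + 1] = '\n' then String.ofList ((s.drop i).take 2) :: loopA s (i + 2)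
        else String.ofList ((s.drop i).take 1) :: loopA s (i + 1)
      else String.ofList ((s.drop i).take 1) :: loopA s (i + 1)
    else if s[i] = '\n' then
      String.ofList ((s.drop i).take 1) :: loopA s (i + 1)
    else
      if hj : innerA s i < s.length then
        if s[innerA s i] = '\r' then
          if h6 : innerA s i + 1 < s.length then
            if s[innerA s i + 1] = '\n' then
              String.ofList ((s.drop i).take (innerA s i + 2 - i)) :: loopA s (innerA s i + 2)
            else String.ofList ((s.drop i).take (innerA s i + 1 - i)) :: loopA s (innerA s i + 1)
          else String.ofList ((s.drop i).take (innerA s i + 1 - i)) :: loopA s (innerA s i + 1)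
        else String.ofList ((s.drop i).take (innerA s i + 1 - i)) :: loopA s (innerA s i + 1)
      else String.ofList ((s.drop i).take (innerA s i - i)) :: loopA s (innerA s i)
  else []
termination_by s.length - i
decreasing_by
  · omega
  · omega
  · omega
  · omega
  · have := innerA_ge s i; omega
  · have := innerA_ge s i; omega
  · have := innerA_ge s i; omega
  · have := innerA_ge s i; omega
  · omega

def split_lines_preserve_py (source : String) : List String := loopA source.toList 0

-- ===== PORT B =====
-- hand port of str.splitlines(keepends=True); exact on Dom (the extra Python separators \v \f \x1c-\x1e \x85 U+2028/9 lie outside Dom)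
def linesB : List Char → List String
  | [] => []
  | c :: rest =>
    if c = '\r' then
      match rest with
      | d :: rest' => if d = '\n' then "\r\n" :: linesB rest' else "\r" :: linesB (d :: rest')
      | [] => ["\r"]
    else if c = '\n' then "\n" :: linesB rest
    else
      match linesB rest with
      | [] => [String.ofList [c]]
      | l :: ls => String.ofList (c :: l.toList) :: ls

def split_lines_preserve_py_alt (source : String) : List String := linesB source.toList

-- ===== PRECONDITION & SPEC =====
def Spec_split_lines_preserve_py (source : String) (out : List String) : Prop := out = split_lines_preserve_py_alt source
instance (source : String) (out : List String) : Decidable (Spec_split_lines_preserve_py source out) := by unfold Spec_split_lines_preserve_py; infer_instance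

-- ===== CLAIM (what is proved, stated in full; the proofs are below) =====
def Claim_equal_split_lines_preserve_py : Prop := ∀ (source : String), Dom_split_lines_preserve_py source → Spec_split_lines_preserve_py source (split_lines_preserve_py source)

-- ===== LEMMAS AND PROOFS =====


lemma innerA_stop (s : List Char) (j : Nat) (h : j < s.length) (hl : s[j] = '\r' ∨ s[j] = '\n') :
    innerA s j = j := by
  unfold innerA; simp [h, hl]

lemma innerA_step (s : List Char) (j : Nat) (h : j < s.length) (hl : ¬ (s[j] = '\r' ∨ s[j] = '\n')) :
    innerA s j = innerA s (j + 1) := by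
  conv_lhs => rw [innerA]
  simp [h, hl]

lemma innerA_of_ge (s : List Char) (j : Nat) (h : ¬ j < s.length) : innerA s j = j := by
  unfold innerA; simp [h]

lemma loopA_nil (s : List Char) (i : Nat) (h : ¬ i < s.length) : loopA s i = [] := by
  rw [loopA]; simp [h]

lemma take_drop_cons (s : List Char) (i m : Nat) (hi : i < s.length) (him : i + 1 ≤ m) :
    (s.drop i).take (m - i) = s[i] :: (s.drop (i + 1)).take (m - (i + 1)) := by
  rw [List.drop_eq_getElem_cons hi]
  have h2 : m - i = (m - (i + 1)) + 1 := by omega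
  rw [h2, List.take_succ_cons]

lemma loopA_step (s : List Char) (i : Nat) (hi : i < s.length)
    (hr : s[i] ≠ '\r') (hn : s[i] ≠ '\n') :
    loopA s i = match loopA s (i + 1) with
      | [] => [String.ofList [s[i]]]
      | l :: ls => String.ofList (s[i] :: l.toList) :: ls := by
  have hnl : ¬ (s[i] = '\r' ∨ s[i] = '\n') := not_or.mpr ⟨hr, hn⟩
  have hj : innerA s i = innerA s (i + 1) := innerA_step s i hi hnl
  rw [loopA, dif_pos hi, if_neg hr, if_neg hn, hj]
  by_cases h1 : i + 1 < s.length
  · conv_rhs => rw [loopA, dif_pos h1]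
    by_cases hc1 : s[i + 1] = '\r'
    · have hj2 : innerA s (i + 1) = i + 1 := innerA_stop s (i + 1) h1 (Or.inl hc1)
      rw [hj2]
      by_cases h6 : i + 1 + 1 < s.length
      · by_cases hc2 : s[i + 1 + 1] = '\n'
        · simp only [dif_pos h1, dif_pos h6, if_pos hc1, if_pos hc2]
          rw [take_drop_cons s i (i + 1 + 2) hi (by omega)]
          (try simp only [String.toList_ofList]); all_goals (congr 3 <;> first | rfl | omega | (congr 1 <;> first | rfl | omega))
        · simp only [dif_pos h1, dif_pos h6, if_pos hc1, if_neg hc2]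
          rw [take_drop_cons s i (i + 1 + 1) hi (by omega)]
          (try simp only [String.toList_ofList]); all_goals (congr 3 <;> first | rfl | omega | (congr 1 <;> first | rfl | omega))
      · simp only [dif_pos h1, dif_neg h6, if_pos hc1]
        rw [take_drop_cons s i (i + 1 + 1) hi (by omega)]
        (try simp only [String.toList_ofList]); all_goals (congr 3 <;> first | rfl | omega | (congr 1 <;> first | rfl | omega))
    · by_cases hc2 : s[i + 1] = '\n'
      · have hj2 : innerA s (i + 1) = i + 1 := innerA_stop s (i + 1) h1 (Or.inr hc2)
        rw [hj2]
        simp only [dif_pos h1, if_neg hc1, if_pos hc2]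
        rw [take_drop_cons s i (i + 1 + 1) hi (by omega)]
        (try simp only [String.toList_ofList]); all_goals (congr 3 <;> first | rfl | omega | (congr 1 <;> first | rfl | omega))
      · have hge : i + 1 ≤ innerA s (i + 1) := innerA_ge s (i + 1)
        simp only [if_neg hc1, if_neg hc2]
        by_cases hjl : innerA s (i + 1) < s.length
        · by_cases hc3 : s[innerA s (i + 1)] = '\r'
          · by_cases h6 : innerA s (i + 1) + 1 < s.length
            · by_cases hc4 : s[innerA s (i + 1) + 1] = '\n'
              · simp only [dif_pos hjl, dif_pos h6, if_pos hc3, if_pos hc4]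
                rw [take_drop_cons s i (innerA s (i + 1) + 2) hi (by omega)]
                (try simp only [String.toList_ofList]); all_goals (congr 3 <;> first | rfl | omega | (congr 1 <;> first | rfl | omega))
              · simp only [dif_pos hjl, dif_pos h6, if_pos hc3, if_neg hc4]
                rw [take_drop_cons s i (innerA s (i + 1) + 1) hi (by omega)]
                (try simp only [String.toList_ofList]); all_goals (congr 3 <;> first | rfl | omega | (congr 1 <;> first | rfl | omega))
            · simp only [dif_pos hjl, dif_neg h6, if_pos hc3]
              rw [take_drop_cons s i (innerA s (i + 1) + 1) hi (by omega)]
              (try simp only [String.toList_ofList]); all_goals (congr 3 <;> first | rfl | omega | (congr 1 <;> first | rfl | omega))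
          · simp only [dif_pos hjl, if_neg hc3]
            rw [take_drop_cons s i (innerA s (i + 1) + 1) hi (by omega)]
            (try simp only [String.toList_ofList]); all_goals (congr 3 <;> first | rfl | omega | (congr 1 <;> first | rfl | omega))
        · simp only [dif_neg hjl]
          rw [take_drop_cons s i (innerA s (i + 1)) hi (by omega)]
          (try simp only [String.toList_ofList]); all_goals (congr 3 <;> first | rfl | omega | (congr 1 <;> first | rfl | omega))
  · have hj2 : innerA s (i + 1) = i + 1 := innerA_of_ge s (i + 1) h1
    rw [hj2, dif_neg (by omega : ¬ i + 1 < s.length), loopA_nil s (i + 1) h1]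
    rw [take_drop_cons s i (i + 1) hi (by omega)]
    simp [List.drop_eq_nil_of_le (by omega : s.length ≤ i + 1)]

lemma main_lemma (s : List Char) : ∀ k i, i ≤ s.length → s.length - i = k → loopA s i = linesB (s.drop i) := by
  intro k
  induction k using Nat.strong_induction_on with
  | _ k IH =>
    intro i hi hk
    by_cases h : i < s.length
    · have hdrop : s.drop i = s[i] :: s.drop (i + 1) := List.drop_eq_getElem_cons h
      by_cases hr : s[i] = '\r'
      · by_cases h2 : i + 1 < s.length
        · have hdrop2 : s.drop (i + 1) = s[i + 1] :: s.drop (i + 2) := List.drop_eq_getElem_cons h2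
          by_cases hc : s[i + 1] = '\n'
          · rw [loopA, dif_pos h, if_pos hr, dif_pos h2, if_pos hc]
            rw [IH (s.length - (i + 2)) (by omega) (i + 2) (by omega) rfl]
            rw [hdrop, hdrop2]
            simp [linesB, hr, hc]
          · rw [loopA, dif_pos h, if_pos hr, dif_pos h2, if_neg hc]
            rw [IH (s.length - (i + 1)) (by omega) (i + 1) (by omega) rfl]
            rw [hdrop, hdrop2]
            simp [linesB, hr, hc]
        · rw [loopA, dif_pos h, if_pos hr, dif_neg h2]
          rw [IH (s.length - (i + 1)) (by omega) (i + 1) (by omega) rfl]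
          rw [hdrop]
          have hnil : s.drop (i + 1) = [] := List.drop_eq_nil_of_le (by omega)
          rw [hnil]
          simp [linesB, hr]
      · by_cases hn : s[i] = '\n'
        · rw [loopA, dif_pos h, if_neg hr, if_pos hn]
          rw [IH (s.length - (i + 1)) (by omega) (i + 1) (by omega) rfl]
          rw [hdrop, hn]
          conv_rhs => rw [linesB.eq_def]
          simp
        · rw [loopA_step s i h hr hn, hdrop]
          rw [IH (s.length - (i + 1)) (by omega) (i + 1) (by omega) rfl]
          conv_rhs => rw [linesB.eq_def]
          simp [hr, hn]
    · rw [loopA_nil s i h, List.drop_eq_nil_of_le (by omega : s.length ≤ i)]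
      simp [linesB]

-- ===== VERDICT (by name: the statement is the Claim_ definition above) =====
theorem split_lines_preserve_py_spec : Claim_equal_split_lines_preserve_py := by
  intro source _
  unfold Spec_split_lines_preserve_py split_lines_preserve_py split_lines_preserve_py_alt
  simpa using main_lemma source.toList (source.toList.length) 0 (by omega) (by omega)
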